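-- pv_equiv track=rewrite | github.com/DDDYuan/advent-of-code-2020 | tasks/day20.py | calculate_single_edges_count
-- ===== SOURCE A (Python) =====
-- def calculate_single_edges_count(current_index, all_edges):
--     found1 = False
--     found2 = False
--     found3 = False
--     found4 = False
--     tile_id, (num1, _), (num2, _), (num3, _), (num4, _) = all_edges[current_index]
--     for i in range(len(all_edges)):
--         if i != current_index:
--             c_id, (c11, c12), (c21, c22), (c31, c32), (c41, c42) = all_edges[i]
--             if num1 in [c11, c12, c21, c22, c31, c32, c41, c42]:
--                 found1 = True
--             if num2 in [c11, c12, c21, c22, c31, c32, c41, c42]: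
--                 found2 = True
--             if num3 in [c11, c12, c21, c22, c31, c32, c41, c42]:
--                 found3 = True
--             if num4 in [c11, c12, c21, c22, c31, c32, c41, c42]:
--                 found4 = True
--     return len([1 for found in [found1, found2, found3, found4] if found is False])
-- ===== SOURCE B (Python) =====
-- def calculate_single_edges_count(current_index, all_edges):
--     where = {}
--     for i, (_, e1, e2, e3, e4) in enumerate(all_edges):
--         for v in e1 + e2 + e3 + e4:
--             where.setdefault(v, set()).add(i)
--     _, (num1, _), (num2, _), (num3, _), (num4, _) = all_edges[current_index]
--     return sum(1 for v in (num1, num2, num3, num4)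
--                if where[v] <= {current_index})
-- ===== Notes on version B (the rewrite author's own statement) =====
-- stated objective: alternative
-- what changed: Replaces A's four found-flags with their per-tile 8-element membership scans and skip test by an inverted index built in one unconditional pass (edge value -> set of tile indices containing it); each of the four edges is then answered by a single subset test where[v] <= {current_index}.
import Mathlib
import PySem

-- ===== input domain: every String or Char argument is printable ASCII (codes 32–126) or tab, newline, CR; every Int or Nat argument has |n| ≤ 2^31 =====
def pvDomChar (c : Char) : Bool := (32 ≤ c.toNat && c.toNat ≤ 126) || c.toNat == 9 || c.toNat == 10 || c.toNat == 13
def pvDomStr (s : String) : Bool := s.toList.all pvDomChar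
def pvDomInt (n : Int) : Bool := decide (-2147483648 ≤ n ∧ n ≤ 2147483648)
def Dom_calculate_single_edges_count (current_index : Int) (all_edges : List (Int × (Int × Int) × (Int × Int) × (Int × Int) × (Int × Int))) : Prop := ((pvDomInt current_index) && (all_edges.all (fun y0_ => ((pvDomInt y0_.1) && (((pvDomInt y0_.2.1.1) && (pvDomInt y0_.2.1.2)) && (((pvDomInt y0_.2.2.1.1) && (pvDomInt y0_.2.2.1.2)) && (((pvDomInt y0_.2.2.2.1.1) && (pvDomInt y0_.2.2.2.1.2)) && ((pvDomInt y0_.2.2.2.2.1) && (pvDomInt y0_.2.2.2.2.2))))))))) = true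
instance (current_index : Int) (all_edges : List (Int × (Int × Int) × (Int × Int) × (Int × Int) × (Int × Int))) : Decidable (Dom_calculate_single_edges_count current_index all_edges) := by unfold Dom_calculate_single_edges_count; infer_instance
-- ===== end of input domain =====

set_option maxHeartbeats 1000000


-- B replaces A's four found-flags with per-tile scans and skip test by an inverted index
-- (edge value -> set of tile indices) built in one unconditional pass, answering each edge
-- by a subset test against {current_index} (objective: alternative).

-- ===== PORT A =====
def calculate_single_edges_count (current_index : Int) (all_edges : List (Int × (Int × Int) × (Int × Int) × (Int × Int) × (Int × Int))) : Int :=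
  match PySem.List.pyGet? all_edges current_index with
  | none => 0  -- IndexError; excluded by Pre_
  | some (_, (num1, _), (num2, _), (num3, _), (num4, _)) =>
    let st :=
      (PySem.List.pyRange 0 (PySem.List.len all_edges) 1).foldl
        (fun (f : Bool × Bool × Bool × Bool) i =>
          if i ≠ current_index then
            match PySem.List.pyGet? all_edges i with
            | none => f  -- unreachable: i is in range
            | some (_, (c11, c12), (c21, c22), (c31, c32), (c41, c42)) =>
              let es := [c11, c12, c21, c22, c31, c32, c41, c42]
              ((f.1 || es.contains num1), (f.2.1 || es.contains num2),
               (f.2.2.1 || es.contains num3), (f.2.2.2 || es.contains num4))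
          else f)
        (false, false, false, false)
    (([st.1, st.2.1, st.2.2.1, st.2.2.2].filter (fun found => found == false)).length : Int)

-- ===== PORT B =====
def calculate_single_edges_count_alt (current_index : Int) (all_edges : List (Int × (Int × Int) × (Int × Int) × (Int × Int) × (Int × Int))) : Int :=
  let wh :=
    (PySem.List.enumerate all_edges).foldl
      (fun (d : PySem.Dict Int (PySem.Set Int)) p =>
        match p with
        | (i, (_, (c11, c12), (c21, c22), (c31, c32), (c41, c42))) =>
          [c11, c12, c21, c22, c31, c32, c41, c42].foldl
            (fun d v => d.modify v PySem.Set.empty (fun s => PySem.Set.add s i)) d)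
      PySem.Dict.empty
  match PySem.List.pyGet? all_edges current_index with
  | none => 0  -- IndexError; excluded by Pre_
  | some (_, (num1, _), (num2, _), (num3, _), (num4, _)) =>
    -- where[v]: the key is always present (the current tile itself inserts it), so getD is exact here
    (([num1, num2, num3, num4].filter
        (fun v => PySem.Set.issubset (wh.getD v PySem.Set.empty) (PySem.Set.ofList [current_index]))).length : Int)

-- ===== PRECONDITION & SPEC =====
-- Pre_ excludes exactly the indices on which A raises IndexError.
def Pre_calculate_single_edges_count (current_index : Int) (all_edges : List (Int × (Int × Int) × (Int × Int) × (Int × Int) × (Int × Int))) : Prop :=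
  PySem.Raise.InRange all_edges.length current_index
instance (current_index : Int) (all_edges : List (Int × (Int × Int) × (Int × Int) × (Int × Int) × (Int × Int))) : Decidable (Pre_calculate_single_edges_count current_index all_edges) := by unfold Pre_calculate_single_edges_count; infer_instance
def pvWitness_calculate_single_edges_count : Int × (List (Int × (Int × Int) × (Int × Int) × (Int × Int) × (Int × Int))) :=
  (0, [(7, (1, 2), (3, 4), (5, 6), (7, 8)), (9, (1, 9), (10, 11), (12, 13), (14, 15))])
def Spec_calculate_single_edges_count (current_index : Int) (all_edges : List (Int × (Int × Int) × (Int × Int) × (Int × Int) × (Int × Int))) (out : Int) : Prop := out = calculate_single_edges_count_alt current_index all_edges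
instance (current_index : Int) (all_edges : List (Int × (Int × Int) × (Int × Int) × (Int × Int) × (Int × Int))) (out : Int) : Decidable (Spec_calculate_single_edges_count current_index all_edges out) := by unfold Spec_calculate_single_edges_count; infer_instance

-- ===== CLAIM (what is proved, stated in full; the proofs are below) =====
def Claim_equal_calculate_single_edges_count : Prop := ∀ (current_index : Int) (all_edges : List (Int × (Int × Int) × (Int × Int) × (Int × Int) × (Int × Int))), Dom_calculate_single_edges_count current_index all_edges → Pre_calculate_single_edges_count current_index all_edges → Spec_calculate_single_edges_count current_index all_edges (calculate_single_edges_count current_index all_edges)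

-- ===== LEMMAS AND PROOFS =====
def pvBodyA (xs : List (Int × (Int × Int) × (Int × Int) × (Int × Int) × (Int × Int)))
    (ci : Int) (d : Int × (Int × Int) × (Int × Int) × (Int × Int) × (Int × Int))
    (n1 n2 n3 n4 : Int) : (Bool × Bool × Bool × Bool) → Int → (Bool × Bool × Bool × Bool) :=
  fun f i =>
    if i ≠ ci then
      let c := PySem.List.pyGetD xs i d
      let es := [c.2.1.1, c.2.1.2, c.2.2.1.1, c.2.2.1.2, c.2.2.2.1.1, c.2.2.2.1.2, c.2.2.2.2.1, c.2.2.2.2.2]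
      ((f.1 || es.contains n1), (f.2.1 || es.contains n2),
       (f.2.2.1 || es.contains n3), (f.2.2.2 || es.contains n4))
    else f

def pvBodyB (xs : List (Int × (Int × Int) × (Int × Int) × (Int × Int) × (Int × Int)))
    (d : Int × (Int × Int) × (Int × Int) × (Int × Int) × (Int × Int)) :
    PySem.Dict Int (PySem.Set Int) → Int → PySem.Dict Int (PySem.Set Int) :=
  fun dd i =>
    let c := PySem.List.pyGetD xs i d
    [c.2.1.1, c.2.1.2, c.2.2.1.1, c.2.2.1.2, c.2.2.2.1.1, c.2.2.2.1.2, c.2.2.2.2.1, c.2.2.2.2.2].foldl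
      (fun dd v => dd.modify v PySem.Set.empty (fun s => PySem.Set.add s i)) dd

lemma pv_mem_inner (L : List Int) (i j v : Int) (dd : PySem.Dict Int (PySem.Set Int)) :
    (j ∈ (L.foldl (fun dd v => dd.modify v PySem.Set.empty (fun s => PySem.Set.add s i)) dd).getD v PySem.Set.empty
      ↔ j ∈ dd.getD v PySem.Set.empty ∨ (j = i ∧ v ∈ L)) := by
  induction L generalizing dd with
  | nil => simp
  | cons h t ih =>
    simp only [List.foldl]
    rw [ih]
    rw [PySem.Dict.getD_modify]
    by_cases hv : v = h
    · subst hv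
      simp [PySem.Set.mem_add]
      tauto
    · simp [hv]

def pvInv (ci : Int) (dd : PySem.Dict Int (PySem.Set Int)) (n : Int) : Prop :=
  ∃ j, j ∈ dd.getD n PySem.Set.empty ∧ j ≠ ci

lemma pv_core (xs : List (Int × (Int × Int) × (Int × Int) × (Int × Int) × (Int × Int)))
    (ci : Int) (d : Int × (Int × Int) × (Int × Int) × (Int × Int) × (Int × Int))
    (n1 n2 n3 n4 : Int) :
    ∀ (L : List Int) (f1 f2 f3 f4 : Bool) (dd : PySem.Dict Int (PySem.Set Int)),
    (f1 = true ↔ pvInv ci dd n1) → (f2 = true ↔ pvInv ci dd n2) →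
    (f3 = true ↔ pvInv ci dd n3) → (f4 = true ↔ pvInv ci dd n4) →
    (((L.foldl (pvBodyA xs ci d n1 n2 n3 n4) (f1, f2, f3, f4)).1 = true ↔ pvInv ci (L.foldl (pvBodyB xs d) dd) n1) ∧
     ((L.foldl (pvBodyA xs ci d n1 n2 n3 n4) (f1, f2, f3, f4)).2.1 = true ↔ pvInv ci (L.foldl (pvBodyB xs d) dd) n2) ∧
     ((L.foldl (pvBodyA xs ci d n1 n2 n3 n4) (f1, f2, f3, f4)).2.2.1 = true ↔ pvInv ci (L.foldl (pvBodyB xs d) dd) n3) ∧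
     ((L.foldl (pvBodyA xs ci d n1 n2 n3 n4) (f1, f2, f3, f4)).2.2.2 = true ↔ pvInv ci (L.foldl (pvBodyB xs d) dd) n4)) := by
  intro L
  induction L with
  | nil => intro f1 f2 f3 f4 dd h1 h2 h3 h4; exact ⟨h1, h2, h3, h4⟩
  | cons i t ih =>
    intro f1 f2 f3 f4 dd h1 h2 h3 h4
    simp only [List.foldl]
    generalize hg : PySem.List.pyGetD xs i d = c at *
    have hBmem : ∀ (n j : Int), j ∈ (pvBodyB xs d dd i).getD n PySem.Set.empty ↔
        j ∈ dd.getD n PySem.Set.empty ∨ (j = i ∧ n ∈ [c.2.1.1, c.2.1.2, c.2.2.1.1, c.2.2.1.2, c.2.2.2.1.1, c.2.2.2.1.2, c.2.2.2.2.1, c.2.2.2.2.2]) := by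
      intro n j
      simp only [pvBodyB, hg]
      exact pv_mem_inner _ i j n dd
    by_cases hci : i = ci
    · have hA : pvBodyA xs ci d n1 n2 n3 n4 (f1, f2, f3, f4) i = (f1, f2, f3, f4) := by
        simp [pvBodyA, hci]
      have key : ∀ (n : Int) (f : Bool), (f = true ↔ pvInv ci dd n) →
          (f = true ↔ pvInv ci (pvBodyB xs d dd i) n) := by
        intro n f hf
        rw [hf]
        unfold pvInv
        constructor
        · rintro ⟨j, hj, hne⟩; exact ⟨j, (hBmem n j).mpr (Or.inl hj), hne⟩
        · rintro ⟨j, hj, hne⟩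
          rcases (hBmem n j).mp hj with hj' | ⟨hji, _⟩
          · exact ⟨j, hj', hne⟩
          · exact absurd (hji.trans hci) hne
      rw [hA]
      exact ih f1 f2 f3 f4 _ (key n1 f1 h1) (key n2 f2 h2) (key n3 f3 h3) (key n4 f4 h4)
    · have hA : pvBodyA xs ci d n1 n2 n3 n4 (f1, f2, f3, f4) i =
          ((f1 || [c.2.1.1, c.2.1.2, c.2.2.1.1, c.2.2.1.2, c.2.2.2.1.1, c.2.2.2.1.2, c.2.2.2.2.1, c.2.2.2.2.2].contains n1),
           (f2 || [c.2.1.1, c.2.1.2, c.2.2.1.1, c.2.2.1.2, c.2.2.2.1.1, c.2.2.2.1.2, c.2.2.2.2.1, c.2.2.2.2.2].contains n2),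
           (f3 || [c.2.1.1, c.2.1.2, c.2.2.1.1, c.2.2.1.2, c.2.2.2.1.1, c.2.2.2.1.2, c.2.2.2.2.1, c.2.2.2.2.2].contains n3),
           (f4 || [c.2.1.1, c.2.1.2, c.2.2.1.1, c.2.2.1.2, c.2.2.2.1.1, c.2.2.2.1.2, c.2.2.2.2.1, c.2.2.2.2.2].contains n4)) := by
        simp [pvBodyA, hci, hg]
      have key : ∀ (n : Int) (f : Bool), (f = true ↔ pvInv ci dd n) →
          ((f || [c.2.1.1, c.2.1.2, c.2.2.1.1, c.2.2.1.2, c.2.2.2.1.1, c.2.2.2.1.2, c.2.2.2.2.1, c.2.2.2.2.2].contains n) = true ↔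
            pvInv ci (pvBodyB xs d dd i) n) := by
        intro n f hf
        rw [Bool.or_eq_true, hf]
        unfold pvInv
        constructor
        · rintro (⟨j, hj, hne⟩ | hmem)
          · exact ⟨j, (hBmem n j).mpr (Or.inl hj), hne⟩
          · refine ⟨i, (hBmem n i).mpr (Or.inr ⟨rfl, ?_⟩), hci⟩
            simpa using hmem
        · rintro ⟨j, hj, hne⟩
          rcases (hBmem n j).mp hj with hj' | ⟨hji, hmem⟩
          · exact Or.inl ⟨j, hj', hne⟩
          · right; simpa using hmem
      rw [hA]
      exact ih _ _ _ _ _ (key n1 f1 h1) (key n2 f2 h2) (key n3 f3 h3) (key n4 f4 h4)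

lemma pv_main (ci : Int) (xs : List (Int × (Int × Int) × (Int × Int) × (Int × Int) × (Int × Int)))
    (t : Int × (Int × Int) × (Int × Int) × (Int × Int) × (Int × Int))
    (ht : PySem.List.pyGet? xs ci = some t) :
    calculate_single_edges_count ci xs = calculate_single_edges_count_alt ci xs := by
  obtain ⟨tid, ⟨n1, m1⟩, ⟨n2, m2⟩, ⟨n3, m3⟩, ⟨n4, m4⟩⟩ := t
  unfold calculate_single_edges_count calculate_single_edges_count_alt
  rw [ht]
  simp only
  rw [PySem.List.enumerate_eq_map_pyRange xs (tid, (n1, m1), (n2, m2), (n3, m3), (n4, m4)),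
      List.foldl_map]
  rw [PySem.List.foldl_congr_mem (PySem.List.pyRange 0 (PySem.List.len xs) 1) _
        (pvBodyA xs ci (tid, (n1, m1), (n2, m2), (n3, m3), (n4, m4)) n1 n2 n3 n4)
        (false, false, false, false)
        (by
          intro acc i hi
          rw [PySem.List.mem_pyRange_one] at hi
          have h0 : (0 : Int) ≤ i := hi.1
          have h1 : i < (xs.length : Int) := by simpa using hi.2
          have hsome : PySem.List.pyGet? xs i = some (PySem.List.pyGetD xs i (tid, (n1, m1), (n2, m2), (n3, m3), (n4, m4))) := by
            rw [PySem.List.pyGet?_eq_some_getElem xs h0 h1,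
                PySem.List.pyGetD_eq_getElem xs _ h0 h1]
          simp only [hsome]
          rfl)]
  show _ = ((List.filter
      (fun v => PySem.Set.issubset
        ((List.foldl (pvBodyB xs (tid, (n1, m1), (n2, m2), (n3, m3), (n4, m4)))
            PySem.Dict.empty (PySem.List.pyRange 0 (PySem.List.len xs) 1)).getD v PySem.Set.empty)
        (PySem.Set.ofList [ci]))
      [n1, n2, n3, n4]).length : Int)
  obtain ⟨H1, H2, H3, H4⟩ :=
    pv_core xs ci (tid, (n1, m1), (n2, m2), (n3, m3), (n4, m4)) n1 n2 n3 n4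
      (PySem.List.pyRange 0 (PySem.List.len xs) 1) false false false false PySem.Dict.empty
      (by simp [pvInv]) (by simp [pvInv]) (by simp [pvInv]) (by simp [pvInv])
  set stA := (PySem.List.pyRange 0 (PySem.List.len xs) 1).foldl
      (pvBodyA xs ci (tid, (n1, m1), (n2, m2), (n3, m3), (n4, m4)) n1 n2 n3 n4)
      (false, false, false, false) with hstA
  set dB := (PySem.List.pyRange 0 (PySem.List.len xs) 1).foldl
      (pvBodyB xs (tid, (n1, m1), (n2, m2), (n3, m3), (n4, m4))) PySem.Dict.empty with hdB
  have e : ∀ (n : Int) (f : Bool), (f = true ↔ pvInv ci dB n) →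
      PySem.Set.issubset (dB.getD n PySem.Set.empty) (PySem.Set.ofList [ci]) = !f := by
    intro n f hf
    have hsub : PySem.Set.issubset (dB.getD n PySem.Set.empty) (PySem.Set.ofList [ci]) = true ↔ ¬ pvInv ci dB n := by
      rw [PySem.Set.issubset_iff]
      unfold pvInv
      constructor
      · rintro h ⟨j, hj, hne⟩
        have := h j hj
        rw [PySem.Set.mem_ofList] at this
        simp at this
        exact hne this
      · intro h j hj
        rw [PySem.Set.mem_ofList]
        simp only [List.mem_singleton]
        by_contra hne
        exact h ⟨j, hj, hne⟩
    cases f with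
    | false =>
      exact hsub.mpr (fun h => by simpa using hf.mpr h)
    | true =>
      have hp := hf.mp rfl
      cases hb : PySem.Set.issubset (dB.getD n PySem.Set.empty) (PySem.Set.ofList [ci]) with
      | false => rfl
      | true => exact absurd hp (hsub.mp hb)
  have e1 := e n1 stA.1 H1
  have e2 := e n2 stA.2.1 H2
  have e3 := e n3 stA.2.2.1 H3
  have e4 := e n4 stA.2.2.2 H4
  simp only [List.filter, e1, e2, e3, e4]
  cases stA.1 <;> cases stA.2.1 <;> cases stA.2.2.1 <;> cases stA.2.2.2 <;> rfl

-- ===== VERDICT (by name: the statement is the Claim_ definition above) =====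
theorem calculate_single_edges_count_spec : Claim_equal_calculate_single_edges_count := by
  intro ci xs hdom hpre
  unfold Spec_calculate_single_edges_count
  unfold Pre_calculate_single_edges_count at hpre
  have hne : ¬ PySem.List.pyGet? xs ci = none := by
    intro h
    rw [PySem.List.pyGet?_eq_none_iff] at h
    exact h hpre
  obtain ⟨t, ht⟩ := Option.ne_none_iff_exists'.mp hne
  exact pv_main ci xs t ht
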